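-- pv_equiv track=rewrite | github.com/UltraCapJjang-2-11/Timetable_Generator | db/xlsxparser/CourseInfoParser_1.py | collapse_consecutive_nones
-- ===== SOURCE A (Python) =====
-- def collapse_consecutive_nones(row):
--     """
--     한 행의 리스트에서 연속된 None 값을 하나로 축소하여 반환한다.
--     예: ['수업방식', None, None, None, ...] → ['수업방식', None]
--     """
--     new_row = []
--     for cell in row:
--         if cell is None:
--             if not new_row or new_row[-1] is not None:
--                 new_row.append(None)
--         else:
--             new_row.append(cell)
--     return new_row
-- ===== SOURCE B (Python) =====
-- from itertools import groupby
--
-- def collapse_consecutive_nones(row):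
--     new_row = []
--     for is_none, group in groupby(row, key=lambda cell: cell is None):
--         if is_none:
--             new_row.append(None)
--         else:
--             new_row.extend(group)
--     return new_row
-- ===== Notes on version B (the rewrite author's own statement) =====
-- stated objective: idiomatic
-- what changed: B splits the row into maximal runs with itertools.groupby on 'is None' and emits one None per None-run and the whole run otherwise, instead of A's per-element peek at new_row[-1].
import Mathlib
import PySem

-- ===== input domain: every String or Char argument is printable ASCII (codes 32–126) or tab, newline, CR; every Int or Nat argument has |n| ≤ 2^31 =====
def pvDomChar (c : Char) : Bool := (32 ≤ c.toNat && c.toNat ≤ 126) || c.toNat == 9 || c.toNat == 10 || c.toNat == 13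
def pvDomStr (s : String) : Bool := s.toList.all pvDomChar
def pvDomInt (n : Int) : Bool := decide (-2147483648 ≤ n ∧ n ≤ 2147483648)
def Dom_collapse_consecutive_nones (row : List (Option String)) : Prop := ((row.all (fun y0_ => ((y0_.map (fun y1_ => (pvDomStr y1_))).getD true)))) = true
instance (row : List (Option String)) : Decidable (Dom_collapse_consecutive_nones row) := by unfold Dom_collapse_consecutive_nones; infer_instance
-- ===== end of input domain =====

-- B collapses maximal None-runs via run-grouping (itertools.groupby) instead of A's
-- per-element peek at new_row[-1]; same return value, idiomatic decomposition.

-- ===== PORT A =====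
-- A's loop: append None only when new_row is empty or its last element (new_row[-1]) is not None.
def collapse_consecutive_nones (row : List (Option String)) : List (Option String) :=
  row.foldl (fun new_row cell =>
    match cell with
    | none => if new_row = [] ∨ ¬ (new_row.getLast? = some none) then new_row ++ [none] else new_row
    | some s => new_row ++ [some s]) []

-- ===== PORT B =====
-- B's groupby: a leading None starts a maximal None-run (the run's tail is dropWhile isNone),
-- contributing one None; a non-None run is copied element by element.
def collapse_consecutive_nones_alt (row : List (Option String)) : List (Option String) :=
  match row with
  | [] => []
  | none :: rest => none :: collapse_consecutive_nones_alt (rest.dropWhile (·.isNone))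
  | some s :: rest => some s :: collapse_consecutive_nones_alt rest
termination_by row.length
decreasing_by
  · have := (List.dropWhile_sublist (l := rest) (p := (·.isNone))).length_le
    simp; omega
  · simp

-- ===== PRECONDITION & SPEC =====
def Spec_collapse_consecutive_nones (row : List (Option String)) (out : List (Option String)) : Prop := out = collapse_consecutive_nones_alt row
instance (row : List (Option String)) (out : List (Option String)) : Decidable (Spec_collapse_consecutive_nones row out) := by unfold Spec_collapse_consecutive_nones; infer_instance

-- ===== CLAIM (what is proved, stated in full; the proofs are below) =====
def Claim_equal_collapse_consecutive_nones : Prop := ∀ (row : List (Option String)), Dom_collapse_consecutive_nones row → Spec_collapse_consecutive_nones row (collapse_consecutive_nones row)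

-- ===== LEMMAS AND PROOFS =====

-- proof-only helper: A's loop with the "last element is None" fact carried as a flag
def pvG (prevNone : Bool) (row : List (Option String)) : List (Option String) :=
  match row with
  | [] => []
  | none :: rest => if prevNone then pvG true rest else none :: pvG true rest
  | some s :: rest => some s :: pvG false rest

theorem pvFoldl_eq_pvG (row : List (Option String)) (acc : List (Option String)) :
    (row.foldl (fun new_row cell =>
      match cell with
      | none => if new_row = [] ∨ ¬ (new_row.getLast? = some none) then new_row ++ [none] else new_row
      | some s => new_row ++ [some s]) acc)
    = acc ++ pvG (decide (acc.getLast? = some none)) row := by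
  induction row generalizing acc with
  | nil => simp [pvG]
  | cons cell rest ih =>
    cases cell with
    | some s =>
      simp only [List.foldl_cons]
      rw [ih]
      have h1 : (acc ++ [some s]).getLast? = some (some s) := by simp
      simp [pvG, h1]
    | none =>
      simp only [List.foldl_cons]
      by_cases h : acc.getLast? = some none
      · have hne : acc ≠ [] := by intro he; simp [he] at h
        rw [if_neg (by simp [h, hne]), ih]
        simp [pvG, h]
      · rw [if_pos (Or.inr h), ih]
        have h1 : (acc ++ [none]).getLast? = some none := by simp
        simp [pvG, h, h1]

theorem pvG_eq_alt (n : ℕ) (row : List (Option String)) (h : row.length ≤ n) :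
    pvG false row = collapse_consecutive_nones_alt row ∧
    pvG true row = collapse_consecutive_nones_alt (row.dropWhile (·.isNone)) := by
  induction n generalizing row with
  | zero =>
    have : row = [] := by cases row <;> simp_all
    subst this; simp [pvG, collapse_consecutive_nones_alt]
  | succ n ih =>
    cases row with
    | nil => simp [pvG, collapse_consecutive_nones_alt]
    | cons cell rest =>
      simp only [List.length_cons] at h
      cases cell with
      | none =>
        have hd : (rest.dropWhile (·.isNone)).length ≤ n := by
          have := (List.dropWhile_sublist (l := rest) (p := (·.isNone))).length_le
          omega
        constructor
        · simp only [pvG, if_neg (by simp : ¬ (false = true)), collapse_consecutive_nones_alt]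
          rw [(ih rest (by omega)).2]
        · simp only [pvG]
          rw [(ih rest (by omega)).2]
          simp [Option.isNone]
      | some s =>
        constructor
        · simp only [pvG, collapse_consecutive_nones_alt]
          rw [(ih rest (by omega)).1]
        · simp only [pvG]
          rw [(ih rest (by omega)).1]
          simp [collapse_consecutive_nones_alt, Option.isNone]

-- ===== VERDICT (by name: the statement is the Claim_ definition above) =====
theorem collapse_consecutive_nones_spec : Claim_equal_collapse_consecutive_nones := by
  intro row _
  unfold Spec_collapse_consecutive_nones collapse_consecutive_nones
  rw [pvFoldl_eq_pvG]
  simpa using (pvG_eq_alt row.length row le_rfl).1
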